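-- pv_equiv track=rewrite | github.com/Gnimgonk/Test-Development-Demo | src/utils/test_data_manager.py | generate_performance_test_data
-- ===== SOURCE A (Python) =====
-- from typing import List, Dict, Any
--
-- def generate_performance_test_data(count: int = 100) -> List[str]:
--     """
--     生成性能测试数据
--
--     Args:
--         count: 数据数量
--
--     Returns:
--         文本列表
--     """
--     templates = [
--         "这是一个测试文本",
--         "产品质量很好",
--         "服务态度不错",
--         "价格合理",
--         "推荐购买"
--     ]
--     return [f"{template}_{i}" for i in range(count) for template in templates][:count]
-- ===== SOURCE B (Python) =====
-- def generate_performance_test_data(count: int = 100):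
--     templates = [
--         "这是一个测试文本",
--         "产品质量很好",
--         "服务态度不错",
--         "价格合理",
--         "推荐购买",
--     ]
--     return [f"{templates[n % 5]}_{n // 5}" for n in range(count)]
-- ===== Notes on version B (the rewrite author's own statement) =====
-- stated objective: faster
-- what changed: B computes each of the count output strings directly in one pass over range(count), picking the template cyclically and the suffix by integer division, instead of materializing count*len(templates) strings with a nested comprehension and truncating with [:count].
import Mathlib
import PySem

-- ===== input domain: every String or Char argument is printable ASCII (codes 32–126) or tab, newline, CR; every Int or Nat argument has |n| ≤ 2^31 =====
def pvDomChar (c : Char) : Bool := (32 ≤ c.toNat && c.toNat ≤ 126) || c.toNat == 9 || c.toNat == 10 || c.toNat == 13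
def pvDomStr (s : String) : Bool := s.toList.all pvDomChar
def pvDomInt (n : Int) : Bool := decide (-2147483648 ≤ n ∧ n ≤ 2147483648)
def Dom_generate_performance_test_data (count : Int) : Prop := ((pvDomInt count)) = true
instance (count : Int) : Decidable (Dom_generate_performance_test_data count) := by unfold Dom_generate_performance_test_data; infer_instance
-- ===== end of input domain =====

-- B builds each of the count strings directly (cyclic template, integer-division suffix) in one pass,
-- instead of materializing five strings per index and truncating with [:count].

-- shared data constant (the same literal list appears in both Python sources)
def pvTemplates : List String :=
  ["这是一个测试文本", "产品质量很好", "服务态度不错", "价格合理", "推荐购买"]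

-- ===== PORT A =====
def generate_performance_test_data (count : Int) : List String :=
  PySem.List.slice
    ((PySem.List.pyRange 0 count 1).flatMap
      (fun i => pvTemplates.map (fun template => template ++ "_" ++ PySem.Int.toStr i)))
    none (some count)

-- ===== PORT B =====
-- templates[n % 5] is always in range (0 ≤ n % 5 < 5 = len templates), so the default of pyGetD is unreachable
def generate_performance_test_data_alt (count : Int) : List String :=
  (PySem.List.pyRange 0 count 1).map
    (fun n => PySem.List.pyGetD pvTemplates (PySem.Int.mod n 5) "" ++ "_"
              ++ PySem.Int.toStr (PySem.Int.floordiv n 5))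

-- ===== PRECONDITION & SPEC =====
def Spec_generate_performance_test_data (count : Int) (out : List String) : Prop := out = generate_performance_test_data_alt count
instance (count : Int) (out : List String) : Decidable (Spec_generate_performance_test_data count out) := by unfold Spec_generate_performance_test_data; infer_instance

-- ===== CLAIM (what is proved, stated in full; the proofs are below) =====
def Claim_equal_generate_performance_test_data : Prop := ∀ (count : Int), Dom_generate_performance_test_data count → Spec_generate_performance_test_data count (generate_performance_test_data count)

-- ===== LEMMAS AND PROOFS =====

-- element function shared by the rewriting lemmas below
def pvH (i j : Nat) : String :=
  PySem.List.pyGetD pvTemplates (j : Int) "" ++ "_" ++ PySem.Int.toStr (i : Int)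

lemma pvBlock (i : Nat) :
    pvTemplates.map (fun t => t ++ "_" ++ PySem.Int.toStr (i : Int))
      = (List.range 5).map (pvH i) := by
  simp [pvTemplates, pvH, List.range_succ, PySem.List.pyGetD]

lemma pvFlat (n : Nat) :
    (List.range n).flatMap (fun i => (List.range 5).map (pvH i))
      = (List.range (5 * n)).map (fun k => pvH (k / 5) (k % 5)) := by
  induction n with
  | zero => simp
  | succ n ih =>
    rw [List.range_succ (n := n), List.flatMap_append, ih, Nat.mul_succ, List.range_add,
      List.map_append, List.map_map]
    simp only [List.flatMap_cons, List.flatMap_nil, List.append_nil]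
    congr 1
    apply List.map_congr_left
    intro j hj
    simp only [List.mem_range] at hj
    simp only [Function.comp]
    congr 1 <;> omega

lemma pvMain (n : Nat) :
    generate_performance_test_data (n : Int) = generate_performance_test_data_alt (n : Int) := by
  unfold generate_performance_test_data generate_performance_test_data_alt
  rw [PySem.List.slice_to_natCast]
  rw [show PySem.List.pyRange 0 (n : Int) 1
        = (List.range n).map (fun k => ((k : Nat) : Int)) by
      rw [PySem.List.pyRange_one]; simp]
  rw [List.flatMap_map, List.map_map]
  have hb : ∀ i : Nat,
      (fun i : Nat => pvTemplates.map (fun t => t ++ "_" ++ PySem.Int.toStr (i : Int))) i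
        = (List.range 5).map (pvH i) := pvBlock
  rw [List.flatMap_congr (fun i _ => pvBlock i)]
  rw [pvFlat, ← List.map_take, List.take_range, Nat.min_eq_left (by omega)]
  apply List.map_congr_left
  intro k _
  simp only [Function.comp, pvH]
  rw [PySem.Int.mod_eq_emod_of_pos (by omega), PySem.Int.floordiv_eq_ediv_of_pos (by omega)]
  push_cast
  rfl

-- ===== VERDICT (by name: the statement is the Claim_ definition above) =====
theorem generate_performance_test_data_spec : Claim_equal_generate_performance_test_data := by
  intro count _
  unfold Spec_generate_performance_test_data
  by_cases h : 0 ≤ count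
  · obtain ⟨n, rfl⟩ := Int.eq_ofNat_of_zero_le h
    exact pvMain n
  · unfold generate_performance_test_data generate_performance_test_data_alt
    rw [PySem.List.pyRange_one_eq_nil (by omega)]
    simp [PySem.List.slice]
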